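-- pv_equiv track=rewrite | github.com/djiang0825/NGS_barcode | src/validate_barcodes.py | generate_pair_chunk
-- ===== SOURCE A (Python) =====
-- def generate_pair_chunk(start_idx, chunk_size, n):
--     """Generate a chunk of pairs lazily starting from start_idx"""
--     pairs_generated = 0
--     current_idx = 0
--
--     for i in range(n):
--         for j in range(i + 1, n):
--             if current_idx >= start_idx:
--                 if pairs_generated >= chunk_size:
--                     return
--                 yield (i, j)
--                 pairs_generated += 1
--             current_idx += 1
-- ===== SOURCE B (Python) =====
-- def generate_pair_chunk(start_idx, chunk_size, n):
--     """Generate a chunk of pairs lazily starting from start_idx.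
--     Skips whole rows arithmetically instead of scanning every earlier pair one by one."""
--     # locate the starting position (i, j) by subtracting row lengths
--     i = 0
--     rem = max(start_idx, 0)
--     while i < n - 1 and rem >= n - 1 - i:
--         rem -= n - 1 - i
--         i += 1
--     j = i + 1 + rem
--     # emit up to chunk_size pairs from (i, j)
--     emitted = 0
--     while emitted < chunk_size and i < n - 1:
--         yield (i, j)
--         emitted += 1
--         j += 1
--         if j == n:
--             i += 1
--             j = i + 1
-- ===== Notes on version B (the rewrite author's own statement) =====
-- stated objective: alternative
-- what changed: B jumps to the starting pair by subtracting whole row lengths (one row-skip loop, O(n) iterations) and then emits only the requested pairs, instead of A's nested scan that steps through every one of the start_idx skipped pairs one by one.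
import Mathlib
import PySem

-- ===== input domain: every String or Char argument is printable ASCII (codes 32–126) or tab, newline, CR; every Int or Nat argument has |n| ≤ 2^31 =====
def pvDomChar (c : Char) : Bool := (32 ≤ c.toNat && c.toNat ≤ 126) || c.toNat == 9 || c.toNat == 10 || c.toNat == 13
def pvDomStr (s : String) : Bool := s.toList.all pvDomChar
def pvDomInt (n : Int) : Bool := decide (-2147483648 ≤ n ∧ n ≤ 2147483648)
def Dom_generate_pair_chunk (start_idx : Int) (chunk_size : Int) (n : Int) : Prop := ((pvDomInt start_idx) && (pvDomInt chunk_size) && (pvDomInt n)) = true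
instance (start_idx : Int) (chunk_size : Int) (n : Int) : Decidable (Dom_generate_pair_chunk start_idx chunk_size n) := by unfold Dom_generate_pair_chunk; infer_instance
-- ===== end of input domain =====

-- B skips whole rows arithmetically to reach the starting pair, then emits exactly the
-- requested pairs, instead of A's nested scan through every one of the skipped pairs (objective: alternative).
-- The Python A is a generator; both ports return the list of yielded pairs.

-- ===== PORT A =====
-- inner loop 'for j in …': returns (yielded pairs, pairs_generated, current_idx, early-return flag)
def pvAInner (start_idx chunk_size : Int) (i : Int) :
    List Int → Int → Int → (List (List Int) × Int × Int × Bool)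
  | [], pg, ci => ([], pg, ci, false)
  | j :: js, pg, ci =>
    if ci ≥ start_idx then
      if pg ≥ chunk_size then ([], pg, ci, true)
      else
        let r := pvAInner start_idx chunk_size i js (pg + 1) (ci + 1)
        ([i, j] :: r.1, r.2)
    else pvAInner start_idx chunk_size i js pg (ci + 1)

-- outer loop 'for i in range(n)'
def pvAOuter (start_idx chunk_size n : Int) : List Int → Int → Int → List (List Int)
  | [], _, _ => []
  | i :: is, pg, ci =>
    let r := pvAInner start_idx chunk_size i (PySem.List.pyRange (i + 1) n 1) pg ci
    if r.2.2.2 then r.1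
    else r.1 ++ pvAOuter start_idx chunk_size n is r.2.1 r.2.2.1

def generate_pair_chunk (start_idx : Int) (chunk_size : Int) (n : Int) : List (List Int) :=
  pvAOuter start_idx chunk_size n (PySem.List.pyRange 0 n 1) 0 0

-- ===== PORT B =====
-- row-skip loop: while i < n - 1 and rem >= n - 1 - i
def pvBSkip (n : Int) (i rem : Int) : Int × Int :=
  if h : i < n - 1 ∧ rem ≥ n - 1 - i then pvBSkip n (i + 1) (rem - (n - 1 - i))
  else (i, rem)
termination_by (n - 1 - i).toNat
decreasing_by omega

-- emission loop: while emitted < chunk_size and i < n - 1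
def pvBEmit (n chunk : Int) (i j emitted : Int) : List (List Int) :=
  if h : emitted < chunk ∧ i < n - 1 then
    if j + 1 = n then [i, j] :: pvBEmit n chunk (i + 1) (i + 2) (emitted + 1)
    else [i, j] :: pvBEmit n chunk i (j + 1) (emitted + 1)
  else []
termination_by (chunk - emitted).toNat
decreasing_by all_goals omega

def generate_pair_chunk_alt (start_idx : Int) (chunk_size : Int) (n : Int) : List (List Int) :=
  let p := pvBSkip n 0 (max start_idx 0)
  pvBEmit n chunk_size p.1 (p.1 + 1 + p.2) 0

-- ===== PRECONDITION & SPEC =====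
def Spec_generate_pair_chunk (start_idx : Int) (chunk_size : Int) (n : Int) (out : List (List Int)) : Prop := out = generate_pair_chunk_alt start_idx chunk_size n
instance (start_idx : Int) (chunk_size : Int) (n : Int) (out : List (List Int)) : Decidable (Spec_generate_pair_chunk start_idx chunk_size n out) := by unfold Spec_generate_pair_chunk; infer_instance

-- ===== CLAIM (what is proved, stated in full; the proofs are below) =====
def Claim_equal_generate_pair_chunk : Prop := ∀ (start_idx : Int) (chunk_size : Int) (n : Int), Dom_generate_pair_chunk start_idx chunk_size n → Spec_generate_pair_chunk start_idx chunk_size n (generate_pair_chunk start_idx chunk_size n)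

-- ===== LEMMAS AND PROOFS =====

-- the j-th-onward pairs of row i, as lists [i, j]
def pvRow (n i : Int) : List (List Int) :=
  (PySem.List.pyRange (i + 1) n 1).map (fun j => [i, j])

-- all pairs with first component in i..n-1
def pvRows (n i : Int) : List (List Int) :=
  (PySem.List.pyRange i n 1).flatMap (fun k => pvRow n k)

lemma pvRows_nil {n i : Int} (h : n ≤ i) : pvRows n i = [] := by
  simp [pvRows, PySem.List.pyRange_one_eq_nil h]

lemma pvRows_cons {n i : Int} (h : i < n) :
    pvRows n i = pvRow n i ++ pvRows n (i + 1) := by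
  simp [pvRows, PySem.List.pyRange_one_cons h]

lemma pvRow_nil {n i : Int} (h : n ≤ i + 1) : pvRow n i = [] := by
  simp [pvRow, PySem.List.pyRange_one_eq_nil h]

lemma pvRow_length (n i : Int) : (pvRow n i).length = (n - 1 - i).toNat := by
  simp [pvRow, PySem.List.length_pyRange_one]; omega

-- generic run of A's per-pair state machine over a flat list of pairs
def pvRunA (s c : Int) : List (List Int) → Int → Int → (List (List Int) × Int × Int × Bool)
  | [], pg, ci => ([], pg, ci, false)
  | x :: xs, pg, ci =>
    if ci ≥ s then
      if pg ≥ c then ([], pg, ci, true)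
      else
        let r := pvRunA s c xs (pg + 1) (ci + 1)
        (x :: r.1, r.2)
    else pvRunA s c xs pg (ci + 1)

lemma pvAInner_eq_run (s c i : Int) (js : List Int) (pg ci : Int) :
    pvAInner s c i js pg ci = pvRunA s c (js.map (fun j => [i, j])) pg ci := by
  induction js generalizing pg ci with
  | nil => rfl
  | cons j js ih => simp [pvAInner, pvRunA, ih]

lemma pvRunA_append (s c : Int) (L1 L2 : List (List Int)) (pg ci : Int) :
    pvRunA s c (L1 ++ L2) pg ci =
      (let r := pvRunA s c L1 pg ci
       if r.2.2.2 then r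
       else
         let r2 := pvRunA s c L2 r.2.1 r.2.2.1
         (r.1 ++ r2.1, r2.2)) := by
  induction L1 generalizing pg ci with
  | nil => simp [pvRunA]
  | cons x xs ih =>
    simp only [List.cons_append, pvRunA]
    by_cases h1 : ci ≥ s
    · by_cases h2 : pg ≥ c
      · simp [h1, h2]
      · cases hst : (pvRunA s c xs (pg + 1) (ci + 1)).2.2.2 <;>
          simp [h1, h2, ih, hst]

    · cases hst : (pvRunA s c xs pg (ci + 1)).2.2.2 <;>
        simp [h1, ih, hst]

lemma pvAOuter_eq_run (s c n : Int) (is : List Int) (pg ci : Int) :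
    pvAOuter s c n is pg ci = (pvRunA s c (is.flatMap (fun i => pvRow n i)) pg ci).1 := by
  induction is generalizing pg ci with
  | nil => rfl
  | cons i is ih =>
    simp only [pvAOuter, List.flatMap_cons, pvRunA_append, pvAInner_eq_run]
    have : (PySem.List.pyRange (i + 1) n 1).map (fun j => [i, j]) = pvRow n i := rfl
    rw [this]
    split_ifs with h
    · simp
    · simp [ih]

lemma pvRunA_out (s c : Int) (L : List (List Int)) (pg ci : Int) :
    (pvRunA s c L pg ci).1 = (L.drop (s - ci).toNat).take (c - pg).toNat := by
  induction L generalizing pg ci with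
  | nil => simp [pvRunA]
  | cons x xs ih =>
    simp only [pvRunA]
    split_ifs with h1 h2
    · have hs : (s - ci).toNat = 0 := by omega
      have hc : (c - pg).toNat = 0 := by omega
      simp [hs, hc]
    · have hs : (s - ci).toNat = 0 := by omega
      have hs' : (s - (ci + 1)).toNat = 0 := by omega
      have hc : (c - pg).toNat = ((c - (pg + 1)).toNat) + 1 := by omega
      simp [hs, hs', hc, ih]
    · have hs : (s - ci).toNat = ((s - (ci + 1)).toNat) + 1 := by omega
      simp [hs, ih]

lemma pvA_spec (s c n : Int) :
    generate_pair_chunk s c n = ((pvRows n 0).drop s.toNat).take c.toNat := by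
  have h0 : (s - 0).toNat = s.toNat := by omega
  have h1 : (c - 0).toNat = c.toNat := by omega
  rw [generate_pair_chunk, pvAOuter_eq_run, pvRunA_out, h0, h1]
  rfl

-- B's skip loop preserves the suffix of the pair stream and ends inside a row (or past the end)
lemma pvBSkip_spec (n : Int) : ∀ (i rem : Int), 0 ≤ rem →
    0 ≤ (pvBSkip n i rem).2 ∧
    (pvRows n i).drop rem.toNat =
      (pvRows n (pvBSkip n i rem).1).drop (pvBSkip n i rem).2.toNat ∧
    ¬((pvBSkip n i rem).1 < n - 1 ∧ (pvBSkip n i rem).2 ≥ n - 1 - (pvBSkip n i rem).1) := by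
  intro i rem hrem
  induction hk : (n - 1 - i).toNat using Nat.strong_induction_on generalizing i rem with
  | _ k ih =>
    rw [pvBSkip]
    split_ifs with h
    · have hlt : (n - 1 - (i + 1)).toNat < k := by omega
      have hr' : 0 ≤ rem - (n - 1 - i) := by omega
      have := ih _ hlt (i + 1) (rem - (n - 1 - i)) hr' rfl
      refine ⟨this.1, ?_, this.2.2⟩
      rw [← this.2.1]
      have hin : i < n := by omega
      rw [pvRows_cons hin]
      have hlen : rem.toNat = (pvRow n i).length + (rem - (n - 1 - i)).toNat := by
        rw [pvRow_length]; omega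
      rw [hlen, List.drop_append]
      have he : (pvRow n i).length + (rem - (n - 1 - i)).toNat - (pvRow n i).length
          = (rem - (n - 1 - i)).toNat := by omega
      rw [he, List.drop_eq_nil_of_le (by omega), List.nil_append]
    · exact ⟨hrem, rfl, h⟩

-- the pair stream from position (i, j) inside row i
def pvPos (n i j : Int) : List (List Int) :=
  ((PySem.List.pyRange j n 1).map (fun t => [i, t])) ++ pvRows n (i + 1)

lemma pvRow_drop (n i j : Int) (h : i + 1 ≤ j) :
    (pvRow n i).drop (j - (i + 1)).toNat = (PySem.List.pyRange j n 1).map (fun t => [i, t]) := by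
  rw [pvRow, ← List.map_drop]
  congr 1
  by_cases hn : n ≤ j
  · rw [PySem.List.pyRange_one_eq_nil hn, ← List.length_eq_zero_iff,
      List.length_drop, PySem.List.length_pyRange_one]
    omega
  · rw [PySem.List.pyRange_one_append (i + 1) j n h (by omega), List.drop_append]
    have h0 : (j - (i + 1)).toNat - (PySem.List.pyRange (i + 1) j 1).length = 0 := by
      rw [PySem.List.length_pyRange_one]; omega
    have h1 : (PySem.List.pyRange (i + 1) j 1).drop (j - (i + 1)).toNat = [] :=
      List.drop_eq_nil_of_le (by rw [PySem.List.length_pyRange_one])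
    rw [h0, h1, List.drop_zero, List.nil_append]

lemma pvBEmit_spec (n c : Int) : ∀ (emitted i j : Int),
    i + 1 ≤ j → j ≤ n → (i < n - 1 → j < n) →
    pvBEmit n c i j emitted = (pvPos n i j).take (c - emitted).toNat := by
  intro emitted
  induction hk : (c - emitted).toNat using Nat.strong_induction_on generalizing emitted with
  | _ k ih =>
    intro i j hij hjn hlt
    rw [pvBEmit]
    split_ifs with h hroll
    · -- emit [i, j]; rollover to next row
      have hjlt : j < n := hlt h.2
      have hkpos : 0 < k := by omega
      have hdec : (c - (emitted + 1)).toNat < k := by omega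
      have hstep : pvPos n i j = [i, j] :: pvPos n (i + 1) (i + 2) := by
        rw [pvPos, PySem.List.pyRange_one_cons hjlt]
        have : PySem.List.pyRange (j + 1) n 1 = [] := PySem.List.pyRange_one_eq_nil (by omega)
        rw [this]
        have hin : i + 1 < n := by omega
        rw [pvRows_cons hin, pvPos]
        have he2 : i + 1 + 1 = i + 2 := by ring
        simp [pvRow, he2]
      rw [hstep, ih _ hdec (emitted + 1) rfl (i + 1) (i + 2) (by omega) (by omega) (by omega)]
      obtain ⟨k', rfl⟩ : ∃ k', k = k' + 1 := ⟨k - 1, by omega⟩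
      rw [List.take_succ_cons]
      congr 2
      omega
    · -- emit [i, j]; same row
      have hjlt : j < n := hlt h.2
      have hkpos : 0 < k := by omega
      have hdec : (c - (emitted + 1)).toNat < k := by omega
      have hstep : pvPos n i j = [i, j] :: pvPos n i (j + 1) := by
        rw [pvPos, PySem.List.pyRange_one_cons hjlt, pvPos]
        simp
      rw [hstep, ih _ hdec (emitted + 1) rfl i (j + 1) (by omega) (by omega) (by omega)]
      obtain ⟨k', rfl⟩ : ∃ k', k = k' + 1 := ⟨k - 1, by omega⟩
      rw [List.take_succ_cons]
      congr 2
      omega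
    · -- loop guard false
      rcases not_and_or.mp h with hc | hi
      · have : k = 0 := by omega
        simp [this]
      · have hpos : pvPos n i j = [] := by
          rw [pvPos, PySem.List.pyRange_one_eq_nil (show n ≤ j by omega), pvRows_nil (by omega)]
          rfl
        simp [hpos]

lemma pvB_spec (s c n : Int) :
    generate_pair_chunk_alt s c n = ((pvRows n 0).drop s.toNat).take c.toNat := by
  rw [generate_pair_chunk_alt]
  have hsk := pvBSkip_spec n 0 (max s 0) (by omega)
  set p := pvBSkip n 0 (max s 0) with hp
  have hmx : (max s 0).toNat = s.toNat := by omega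
  rw [hmx] at hsk
  rcases not_and_or.mp hsk.2.2 with hi | hrem
  · -- past the last row: both sides empty
    have hi' : n - 1 ≤ p.1 := by omega
    have h1 : pvRows n p.1 = [] := by
      by_cases h : n ≤ p.1
      · exact pvRows_nil h
      · rw [pvRows_cons (by omega), pvRow_nil (by omega), pvRows_nil (by omega)]
        rfl
    rw [pvBEmit]
    rw [dif_neg (by omega)]
    rw [hsk.2.1, h1]
    simp
  · have hrem' : p.2 < n - 1 - p.1 := by omega
    have h0 : 0 ≤ p.2 := hsk.1
    rw [pvBEmit_spec n c 0 p.1 (p.1 + 1 + p.2) (by omega) (by omega) (by omega)]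
    rw [hsk.2.1]
    have : (pvRows n p.1).drop p.2.toNat = pvPos n p.1 (p.1 + 1 + p.2) := by
      by_cases h : n ≤ p.1
      · rw [pvRows_nil h, pvPos, PySem.List.pyRange_one_eq_nil (by omega), pvRows_nil (by omega)]
        simp
      · rw [pvRows_cons (by omega), pvPos]
        have hlen : p.2.toNat ≤ (pvRow n p.1).length := by rw [pvRow_length]; omega
        rw [List.drop_append_of_le_length hlen]
        congr 1
        have := pvRow_drop n p.1 (p.1 + 1 + p.2) (by omega)
        have he : (p.1 + 1 + p.2 - (p.1 + 1)).toNat = p.2.toNat := by omega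
        rw [he] at this
        exact this
    rw [this]
    congr 1
    omega

-- ===== VERDICT (by name: the statement is the Claim_ definition above) =====
theorem generate_pair_chunk_spec : Claim_equal_generate_pair_chunk := by
  intro s c n _
  unfold Spec_generate_pair_chunk
  rw [pvA_spec, pvB_spec]
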